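-- pv_equiv track=rewrite | github.com/ethteck/pokemonsnap | tools/vpk0_codec.py | _encode_offset_fields
-- ===== SOURCE A (Python) =====
-- from typing import List, Optional, Sequence, Tuple, Union
--
-- class Vpk0CompressionError(Exception):
--     """Raised when VPK0 data cannot be compressed."""
--
-- def _encode_offset_fields(move_back: int) -> List[int]:
--     """Return the sequence of tree-values that encodes this move_back
--     for method 1.
--
--     Method-1 offsets are one of:
--       * direct: tree_value = (move_back + 8) >> 2, requires
--                 (move_back + 8) % 4 == 0 and tree_value >= 3.
--       * escaped: two tree-values. Decoder rule:
--                    move_back = (tv0 + 1) + (tv1 << 2) - 8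
--                  with tv0 ∈ {0, 1, 2}.
--     """
--
--     # Prefer the direct encoding when valid: fewer tree reads.
--     if (move_back + 8) % 4 == 0:
--         tv0 = (move_back + 8) >> 2
--         if tv0 >= 3:
--             return [tv0]
--
--     # Escape encoding: pick tv0 in {0,1,2} such that (move_back + 8) - (tv0 + 1)
--     # is divisible by 4 and non-negative.
--     for tv0 in (0, 1, 2):
--         remainder = move_back + 8 - (tv0 + 1)
--         if remainder < 0:
--             continue
--         if remainder % 4 != 0:
--             continue
--         tv1 = remainder >> 2
--         return [tv0, tv1]
--
--     raise Vpk0CompressionError(f"Cannot encode move_back={move_back} in method 1")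
-- ===== SOURCE B (Python) =====
-- from typing import List
--
-- class Vpk0CompressionError(Exception):
--     """Raised when VPK0 data cannot be compressed."""
--
-- def _encode_offset_fields(move_back: int) -> List[int]:
--     # Closed form: (move_back + 8) = 4*q + r with 0 <= r < 4 (Python floor semantics).
--     r = (move_back + 8) % 4
--     q = (move_back + 8) >> 2
--     if r == 0:
--         if q >= 3:
--             return [q]           # direct encoding
--     elif q >= 0:
--         return [r - 1, q]        # escape: tv0 = r-1, tv1 = q
--     raise Vpk0CompressionError(f"Cannot encode move_back={move_back} in method 1")
-- ===== Notes on version B (the rewrite author's own statement) =====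
-- stated objective: simpler
-- what changed: Replaces the bounded search over tv0 in (0,1,2) with a single residue computation: r=(move_back+8)%4 determines the unique escape tv0=r-1 and tv1=(move_back+8)>>2 directly.
import Mathlib
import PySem

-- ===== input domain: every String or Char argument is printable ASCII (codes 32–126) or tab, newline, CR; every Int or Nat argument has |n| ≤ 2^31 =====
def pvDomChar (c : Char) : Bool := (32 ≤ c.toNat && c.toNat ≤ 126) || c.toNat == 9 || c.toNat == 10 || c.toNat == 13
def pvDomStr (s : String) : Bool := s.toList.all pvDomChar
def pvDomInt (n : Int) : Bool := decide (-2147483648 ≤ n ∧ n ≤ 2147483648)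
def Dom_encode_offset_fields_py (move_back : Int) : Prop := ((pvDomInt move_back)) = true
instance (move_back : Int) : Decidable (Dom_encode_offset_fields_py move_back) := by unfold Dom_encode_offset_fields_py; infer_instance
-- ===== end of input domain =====

-- B replaces A's bounded search over tv0 ∈ (0,1,2) by a closed-form residue computation (objective: simpler).


-- ===== PORT A =====
-- the 'for tv0 in (0, 1, 2)' loop: returns some result on the first match, none = fall through to raise
def encOffLoopA (move_back : Int) : List Int → Option (List Int)
  | [] => none
  | tv0 :: rest =>
    let remainder := move_back + 8 - (tv0 + 1)
    if remainder < 0 then encOffLoopA move_back rest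
    else if PySem.Int.mod remainder 4 ≠ 0 then encOffLoopA move_back rest
    else some [tv0, remainder >>> (2:Nat)]

def encode_offset_fields_py (move_back : Int) : List Int :=
  -- direct encoding check
  if PySem.Int.mod (move_back + 8) 4 = 0 ∧ 3 ≤ (move_back + 8) >>> (2:Nat) then
    [(move_back + 8) >>> (2:Nat)]
  else
    match encOffLoopA move_back [0, 1, 2] with
    | some res => res
    | none => []   -- Python raises Vpk0CompressionError here; excluded by Pre_

-- ===== PORT B =====
def encode_offset_fields_py_alt (move_back : Int) : List Int :=
  let r := PySem.Int.mod (move_back + 8) 4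
  let q := (move_back + 8) >>> (2:Nat)
  if r = 0 then
    (if 3 ≤ q then [q] else [])   -- raise when q < 3; excluded by Pre_
  else if 0 ≤ q then [r - 1, q]
  else []                          -- raise; excluded by Pre_

-- ===== PRECONDITION & SPEC =====
-- Pre_ excludes exactly the inputs on which A raises Vpk0CompressionError:
-- (move_back+8) divisible by 4 with move_back < 4, or not divisible with move_back < -8.
def Pre_encode_offset_fields_py (move_back : Int) : Prop :=
  (PySem.Int.mod (move_back + 8) 4 = 0 ∧ 4 ≤ move_back) ∨
  (PySem.Int.mod (move_back + 8) 4 ≠ 0 ∧ -8 ≤ move_back)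
instance (move_back : Int) : Decidable (Pre_encode_offset_fields_py move_back) := by unfold Pre_encode_offset_fields_py; infer_instance

def pvWitness_encode_offset_fields_py : Int := 4

def Spec_encode_offset_fields_py (move_back : Int) (out : List Int) : Prop := out = encode_offset_fields_py_alt move_back
instance (move_back : Int) (out : List Int) : Decidable (Spec_encode_offset_fields_py move_back out) := by unfold Spec_encode_offset_fields_py; infer_instance

-- ===== CLAIM (what is proved, stated in full; the proofs are below) =====
def Claim_equal_encode_offset_fields_py : Prop := ∀ (move_back : Int), Dom_encode_offset_fields_py move_back → Pre_encode_offset_fields_py move_back → Spec_encode_offset_fields_py move_back (encode_offset_fields_py move_back)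

-- ===== LEMMAS AND PROOFS =====

-- Python's x % 4 and x >> 2 for a positive divisor are Int.emod / Int.ediv by 4.
theorem pv_mod4 (x : Int) : PySem.Int.mod x 4 = x % 4 :=
  PySem.Int.mod_eq_emod_of_pos (by norm_num)

theorem pv_shr2 (x : Int) : x >>> (2 : Nat) = x / 4 := by
  have : x >>> (2 : Nat) = x / 2 / 2 := by
    simp [Int.shiftRight_eq_div_pow]
    omega
  omega

-- ===== VERDICT (by name: the statement is the Claim_ definition above) =====
set_option maxHeartbeats 1000000 in
theorem encode_offset_fields_py_spec : Claim_equal_encode_offset_fields_py := by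
  intro mb _ hpre
  unfold Spec_encode_offset_fields_py encode_offset_fields_py encode_offset_fields_py_alt
  unfold Pre_encode_offset_fields_py at hpre
  simp only [encOffLoopA, pv_mod4, pv_shr2] at *
  split_ifs <;> simp_all <;> omega
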